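/- GENERATED by mk_final_copies.py from the proof of the farm's unit `start_decoder.R12` (farm:start_decoder.R12.2: Lemmas.lean) as the
   re-elaboration sweep compiled it — do not edit. -/
/-
  start_decoder.R12 — the submap loop 4132 (head 0x116545). PART 1 (memory level): WHERE the objects are (`Geo`), the loop's
  invariant on the memory (`R12Inv`), its frame lemma over one batch of stores (`R12Inv.transfer`, `.transfer_own`), the exits
  (`R12Inv.maps_succ`, `.failed`, `.frame`). PART 2 (the walk, one lemma per piece, each from one cut assertion to the next):
  `Pt` / `PtC` = the cut assertions; `seg_head` 0x116545 → 0x115f22 (`AtR8`, `++i`) | 0x11648f; `seg_floor_call` 0x11648f → 0x11649c;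
  `seg_floor_store` 0x11649c → 0x1164c7; `seg_residue` 0x1164c7 → 0x116545 (`j + 1`) | 0x113b22 (`AtERR`, two exits).
  Proof.lean composes them with `ReachVia.trans` and `ReachVia.loop`.
-/
import Asan.CheckWalk
import Vorbis.Spec.StartDecoderB
import Vorbis.Spec.Reader
import Vorbis.Spec.Leaves

open X86 X86.User Asan Vorbis Vorbis.Spec Vorbis.Spec.StartDecoder

set_option maxRecDepth 4000
set_option maxHeartbeats 4000000

namespace Vorbis.Spec.start_decoder_R12

/-- **Where `*f` is**: a live object of the callers' frames or of `others` lies above the return-address slot or off the stack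
region. From `Hand.obj` (inside ONE live object) and the shadow layer (`StackOK.active`, `ShadowInv.off`). -/
theorem f_where {u₀ : State} {g : Ghost} {pc : Word} {A : Arena × List Obj} {v : State} (fr : Frame u₀ g pc A v)
    (hh : g.Hand A) :
    g.RA + 8 ≤ g.f ∨ g.f + 1808 ≤ 0x700000 ∨ 0x800000 ≤ g.f := by
  obtain ⟨o, ho, h1, h2⟩ := hh.obj
  simp only [Off.sizeof.stb_vorbis] at h2
  obtain ⟨ra8, _, _⟩ := fr.ra
  rcases List.mem_append.mp ho with hs | hoth
  · left
    unfold stackObjs at hs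
    obtain ⟨bF, hbF, hin⟩ := List.mem_flatMap.mp hs
    have hcall := fr.callers bF hbF
    have hmem : bF ∈ g.frames' := List.mem_cons_of_mem _ hbF
    obtain ⟨k1, k2, _, _, _⟩ := fr.shadow.stack.active bF hmem
    have hg := FrameLayout.objsAt_gran k1 k2 hin
    have e1 : o.gLo = o.base / 8 := rfl
    omega
  · right
    have hoff := fr.shadow.off o hoth
    unfold OffStack at hoff
    omega


/-- **WHERE THE OBJECTS ARE** (memory-independent): the stack frame, `*f`, the arena's buffer and the mapping record `m` under
construction, as arithmetic for `omega`. -/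
structure Geo (g : Ghost) (A : Arena × List Obj) (m : Nat) : Prop where
  ra8 : g.RA % 8 = 0
  room : 0x700000 + 1888 ≤ g.RA
  top : g.RA + 8 ≤ 0x800000
  r_eq : g.R + 1480 = g.RA
  f_lo : 0x119d40 ≤ g.f
  f_hi : g.f + 1808 ≤ 0xC00000
  f_off : g.RA + 8 ≤ g.f ∨ g.f + 1808 ≤ 0x700000 ∨ 0x800000 ≤ g.f
  arena_lo : 0x119d40 ≤ A.1.B
  arena_hi : A.1.B + A.1.L ≤ 0xC00000
  m_lo : A.1.B ≤ m
  m_hi : m + 56 ≤ A.1.B + A.1.L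
  m_off : m + 56 ≤ 0x700000 ∨ 0x800000 ≤ m
  f_out : g.f + 1808 ≤ A.1.B ∨ A.1.B + A.1.L ≤ g.f
  f_log : g.f + 1808 ≤ 0x120640 ∨ 0x120650 ≤ g.f
  a_log : A.1.B + A.1.L ≤ 0x120640 ∨ 0x120650 ≤ A.1.B

/-- **A span the loop body may write** (its own stores and its callees' footprints): the stack below the steady stack pointer
(return addresses, the callees' frames); the spill slots `[R + 10H, R + 1CH)`; the bytes `submap_floor[j ..]`, `submap_residue[j ..]`
of the record under construction; the bit reader's windows of `*f` (with `error`'s `[140, 144)`). -/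
def OKSpan (g : Ghost) (m j : Nat) (w : Span) : Prop :=
  (g.RA - 1888 ≤ w.lo ∧ w.hi ≤ g.R) ∨ (g.R + 0x10 ≤ w.lo ∧ w.hi ≤ g.R + 0x1c) ∨
  (m + 17 + j ≤ w.lo ∧ w.hi ≤ m + 33) ∨ (m + 33 + j ≤ w.lo ∧ w.hi ≤ m + 49) ∨
  (g.f + 48 ≤ w.lo ∧ w.hi ≤ g.f + 56) ∨ (g.f + 84 ≤ w.lo ∧ w.hi ≤ g.f + 96) ∨ (g.f + 136 ≤ w.lo ∧ w.hi ≤ g.f + 144) ∨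
  (g.f + 1484 ≤ w.lo ∧ w.hi ≤ g.f + 1749) ∨ (g.f + 1752 ≤ w.lo ∧ w.hi ≤ g.f + 1784)

/-- **THE INVARIANT OF LOOP 4132 ON THE MEMORY** (head 0x116545): the memory part of `Frame`, the point `Mid g 7 8 8`, MAPS(i) with the
ages of its blocks, the record `m = m(i)` under construction with MP2 – MP5, and MP6 for the submaps below the counter `j`. The
mapping loop's counter slot `[R + 10H]` is NOT part of it (the exit increments it). -/
structure R12Inv (u₀ : State) (g : Ghost) (i : Nat) (A7 A7c Ai : Arena) (A : Arena × List Obj) (m j : Nat) (mem : Mem) :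
    Prop where
  saved_rbx : mem.u64 (g.R + 0x598) = (g.e.reg .rbx).toNat
  saved_rbp : mem.u64 (g.R + 0x5a0) = (g.e.reg .rbp).toNat
  saved_r12 : mem.u64 (g.R + 0x5a8) = (g.e.reg .r12).toNat
  saved_r13 : mem.u64 (g.R + 0x5b0) = (g.e.reg .r13).toNat
  saved_r14 : mem.u64 (g.R + 0x5b8) = (g.e.reg .r14).toNat
  saved_r15 : mem.u64 (g.R + 0x5c0) = (g.e.reg .r15).toNat
  saved_ra : mem.u64 (g.R + 0x5c8) = g.ret.toNat
  code : CodeOK u₀ mem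
  shadow : ShadowInv A.2 g.frames' g.R mem
  sh7 : Log2_4In mem
  same : Mem.SameExcept (footprint g) g.e.mem mem
  mid : Mid g 7 8 8 A7 A mem
  maps : MapTrans A7 A7c Ai A.1 mem g.f i
  hm : mapAt g mem i = m
  cur : MapCur g (Since Ai A.1) mem i 12
  sub : ∀ s : Nat, s < j → Mapping.SubmapOK mem g.f m s

/-- The windows of `*f` that `Mid g 7 8 8` reads, as numerals. -/
theorem winsAt78 : Mid.winsAt 7 8 = [(0, 8), (24, 48), (152, 464), (480, 1480), (1749, 1750), (1784, 1788)] := by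
  decide


/-- The mapping table of the point: a block of the arena that contains the record `m(i)`, `i < mapping_count`, and lies off
the stack region. -/
theorem table_facts {A7 A7c Ai : Arena} {A : Arena × List Obj} {mem : Mem} {f i : Nat}
    (hmaps : MapTrans A7 A7c Ai A.1 mem f i)
    (hlt : (i : Int) < stb_vorbis.mapping_count mem f) :
    A.1.Blk ⟨stb_vorbis.mapping mem f, Off.sizeof.Mapping * (stb_vorbis.mapping_count mem f).toNat⟩ ∧
    ¬ A7.Blk ⟨stb_vorbis.mapping mem f, Off.sizeof.Mapping * (stb_vorbis.mapping_count mem f).toNat⟩ ∧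
    A7c.Blk ⟨stb_vorbis.mapping mem f, Off.sizeof.Mapping * (stb_vorbis.mapping_count mem f).toNat⟩ ∧
    stb_vorbis.mapping_at mem f i + 56 ≤
      stb_vorbis.mapping mem f + Off.sizeof.Mapping * (stb_vorbis.mapping_count mem f).toNat := by
  have hT := hmaps.MP1_block
  have hTA : A.1.Blk ⟨stb_vorbis.mapping mem f, Off.sizeof.Mapping * (stb_vorbis.mapping_count mem f).toNat⟩ :=
    (hT.1.mono hmaps.ext7c).mono hmaps.exti
  refine ⟨hTA, hT.2, hT.1, ?_⟩
  simp only [vacc, voff] at hlt ⊢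
  omega


/-- **FRAME OF THE LOOP INVARIANT** over a batch of stores / a callee's footprint made of `OKSpan`s; `Bits` is given for the new
memory (the reader's post, or `Bits.frame_fields`). -/
theorem R12Inv.transfer {u₀ : State} {g : Ghost} {i : Nat} {A7 A7c Ai : Arena} {A : Arena × List Obj} {m j : Nat}
    {mem mem' : Mem} (h : R12Inv u₀ g i A7 A7c Ai A m j mem) (geo : Geo g A m)
    (hext : g.A0.1.Extends A.1) (hj : j ≤ 16)
    {ws : List Span} (hs : Mem.SameExcept ws mem mem') (hw : ∀ w, w ∈ ws → OKSpan g m j w)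
    (hbits : Bits (g.Blk A) g.len mem' g.f) : R12Inv u₀ g i A7 A7c Ai A m j mem' := by
  obtain ⟨ra8, room, top, r_eq, f_lo, f_hi, f_off, arena_lo, arena_hi, m_lo, m_hi, m_off, f_out, f_log, a_log⟩ := geo
  have eq_of : ∀ lo hi : Nat, (∀ w, OKSpan g m j w → hi ≤ w.lo ∨ w.hi ≤ lo) → Mem.EqOn lo hi mem mem' :=
    fun lo hi hd => hs.eqOn lo hi (fun w hw' => hd w (hw w hw'))
  have e_saved : Mem.EqOn (g.R + 0x598) (g.R + 0x5d0) mem mem' := by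
    apply eq_of
    intro w hw'
    unfold OKSpan at hw'
    omega
  have e_idx : Mem.EqOn (g.R + 8) (g.R + 0x10) mem mem' := by
    apply eq_of
    intro w hw'
    unfold OKSpan at hw'
    omega
  have e_c : Mem.EqOn (g.R + 0x20) (g.R + 0x2c) mem mem' := by
    apply eq_of
    intro w hw'
    unfold OKSpan at hw'
    omega
  have e_text : Mem.EqOn L.textLo L.textHi mem mem' := by
    apply eq_of
    intro w hw'
    unfold OKSpan at hw'
    simp only [L.textLo, L.textHi]
    omega
  have e_sh : Mem.EqOn 0xC00000 0xE00000 mem mem' := by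
    apply eq_of
    intro w hw'
    unfold OKSpan at hw'
    omega
  have e_log : Mem.EqOn 0x120640 0x120650 mem mem' := by
    apply eq_of
    intro w hw'
    unfold OKSpan at hw'
    omega
  have e_f1 : Mem.EqOn g.f (g.f + 48) mem mem' := by
    apply eq_of
    intro w hw'
    unfold OKSpan at hw'
    omega
  have e_f3 : Mem.EqOn (g.f + 96) (g.f + 136) mem mem' := by
    apply eq_of
    intro w hw'
    unfold OKSpan at hw'
    omega
  have e_f4 : Mem.EqOn (g.f + 144) (g.f + 1484) mem mem' := by
    apply eq_of
    intro w hw'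
    unfold OKSpan at hw'
    omega
  have e_f5 : Mem.EqOn (g.f + 1749) (g.f + 1752) mem mem' := by
    apply eq_of
    intro w hw'
    unfold OKSpan at hw'
    omega
  have e_f6 : Mem.EqOn (g.f + 1784) (g.f + 1808) mem mem' := by
    apply eq_of
    intro w hw'
    unfold OKSpan at hw'
    omega
  have e_m : Mem.EqOn m (m + 17) mem mem' := by
    apply eq_of
    intro w hw'
    unfold OKSpan at hw'
    omega
  have e_fl : Mem.EqOn (m + 17) (m + 17 + j) mem mem' := by
    apply eq_of
    intro w hw'
    unfold OKSpan at hw'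
    omega
  have e_rs : Mem.EqOn (m + 33) (m + 33 + j) mem mem' := by
    apply eq_of
    intro w hw'
    unfold OKSpan at hw'
    omega
  -- the fields of `*f` the clauses compare with
  have ecount : stb_vorbis.mapping_count mem' g.f = stb_vorbis.mapping_count mem g.f := by
    simp only [vacc, voff]
    exact e_f4.i32 _ (by omega) (by omega) (by omega)
  have etab : stb_vorbis.mapping mem' g.f = stb_vorbis.mapping mem g.f := by
    simp only [vacc, voff]
    exact e_f4.ptr _ (by omega) (by omega) (by omega)
  have hC : stb_vorbis.channels mem' g.f = stb_vorbis.channels mem g.f := by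
    simp only [vacc, voff]
    exact e_f1.i32 _ (by omega) (by omega) (by omega)
  have hfl : stb_vorbis.floor_count mem' g.f = stb_vorbis.floor_count mem g.f := by
    simp only [vacc, voff]
    exact e_f4.i32 _ (by omega) (by omega) (by omega)
  have hrc : stb_vorbis.residue_count mem' g.f = stb_vorbis.residue_count mem g.f := by
    simp only [vacc, voff]
    exact e_f4.i32 _ (by omega) (by omega) (by omega)
  have eat : ∀ k, stb_vorbis.mapping_at mem' g.f k = stb_vorbis.mapping_at mem g.f k := by
    intro k
    unfold stb_vorbis.mapping_at
    rw [etab]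
  -- the mapping table
  obtain ⟨hTA, hT7, hT7c, hTin⟩ := table_facts h.maps h.cur.lt
  have hmm : stb_vorbis.mapping_at mem g.f i = m := h.hm
  have hmdef : m = stb_vorbis.mapping mem g.f + 56 * i := by
    rw [← hmm]
    simp only [vacc, voff]
  have hToff := h.mid.arena.blk_off_stack hTA
  have hTins := arena_inside h.mid.arena hTA
  simp only [] at hToff hTins
  -- every other block of the arena is kept
  have kept_arena : ∀ C : Block, A.1.Blk C →
      C ≠ ⟨stb_vorbis.mapping mem g.f, Off.sizeof.Mapping * (stb_vorbis.mapping_count mem g.f).toNat⟩ →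
      C.Kept mem mem' := by
    intro C hCA hne
    have hd := arena_disjoint h.mid.arena hCA hTA hne
    have hoff := h.mid.arena.blk_off_stack hCA
    have hins := arena_inside h.mid.arena hCA
    simp only [vblock] at hd
    apply Block.Kept.of_sameExcept hs
    · intro w hw'
      have := hw w hw'
      unfold OKSpan at this
      omega
    · omega
  have hR : g.R + 0x5d0 ≤ 2 ^ 64 := by omega
  -- the arena layer and the point
  have harena : ArenaOK A.1 A.2 mem' g.f := by
    apply h.mid.arena.frame (by simp only [voff]; omega)
    simp only [voff]
    exact e_f3.mono (by omega) (by omega)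
  have hmid : Mid g 7 8 8 A7 A mem' := by
    apply h.mid.frame ?he ?hk ?hconsts ?hslot e_sh harena hbits
    case he =>
      rw [winsAt78]
      apply ObjEq.of_sameExcept hs
      · intro w hw'
        simp only [List.mem_cons, List.mem_nil_iff, or_false] at hw'
        rcases hw' with rfl | rfl | rfl | rfl | rfl | rfl <;> simp only [] <;> omega
      · intro w hw' sp hsp
        have := hw sp hsp
        unfold OKSpan at this
        simp only [List.mem_cons, List.mem_nil_iff, or_false] at hw'
        rcases hw' with rfl | rfl | rfl | rfl | rfl | rfl <;> simp only [] <;> omega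
    case hk =>
      intro B hB
      apply kept_arena B (hB.mono h.mid.extc)
      intro e
      rw [e] at hB
      exact hT7 hB
    case hconsts =>
      have hc := h.mid.consts
      refine ⟨hc.aligned, ?_, ?_, ?_, ?_⟩
      · rw [e_idx.u64 _ (by omega) (by omega) (by omega)]
        exact hc.shadowIdx
      · rw [e_c.u32 _ (by omega) (by omega) (by omega)]
        exact hc.one20
      · intro h7
        omega
      · intro h2 h11
        rw [e_c.u32 _ (by omega) (by omega) (by omega)]
        exact hc.z24 h2 h11
    case hslot =>
      intro _ _
      exact e_c.i32 _ (by omega) (by omega) (by omega)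
  have he3 : ObjEq MappingAtOK.wins mem g.f mem' g.f := by
    apply ObjEq.of_sameExcept hs
    · intro w hw'
      simp only [MappingAtOK.wins, List.mem_cons, List.mem_nil_iff, or_false] at hw'
      rcases hw' with rfl | rfl | rfl <;> simp only [] <;> omega
    · intro w hw' sp hsp
      have := hw sp hsp
      unfold OKSpan at this
      simp only [MappingAtOK.wins, List.mem_cons, List.mem_nil_iff, or_false] at hw'
      rcases hw' with rfl | rfl | rfl <;> simp only [] <;> omega
  -- MAPS(i): the finished records lie below the record under construction
  have hmaps : MapTrans A7 A7c Ai A.1 mem' g.f i := by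
    refine ⟨h.maps.ext7, h.maps.ext7c, h.maps.exti, ?_, ?_, ?_, ?_⟩
    · rw [ecount]
      exact h.maps.n_le
    · rw [ecount]
      exact h.maps.MP1
    · rw [ecount, etab]
      exact h.maps.MP1_block
    · intro i' hi'
      rw [eat i']
      have hrec := h.maps.record i' hi'
      have hb : stb_vorbis.mapping_at mem g.f i' = stb_vorbis.mapping mem g.f + 56 * i' := by
        simp only [vacc, voff]
      apply hrec.frame he3
      · apply Block.Kept.of_sameExcept hs
        · intro w hw'
          have := hw w hw'
          unfold OKSpan at this
          simp only [voff] at hTin hTins hToff ⊢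
          rw [hb]
          omega
        · simp only [voff] at hTin hTins hToff ⊢
          rw [hb]
          omega
      · have h2 := hrec.MP2
        apply kept_arena _ (h2.1.mono h.maps.exti)
        intro e
        rw [e] at h2
        exact h2.2 hT7c
      · exact hrec.MP2
  -- the record under construction: its first 17 bytes and its `chan` block are kept
  have hma : mapAt g mem i = m := h.hm
  have hma' : mapAt g mem' i = m := by
    unfold mapAt
    rw [eat i]
    exact hmm
  obtain ⟨c1, c2, c3, c4, _, c6, c7⟩ := h.cur
  rw [hma] at c2 c3 c4 c6 c7
  have hn : nchan mem' g.f = nchan mem g.f := by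
    rw [nchan_def, nchan_def, hC]
  have e1 : Mapping.chan mem' m = Mapping.chan mem m := by
    simp only [vacc, voff]
    exact e_m.ptr _ (by omega) (by omega) (by omega)
  have e2 : Mapping.submaps mem' m = Mapping.submaps mem m := by
    simp only [vacc, voff]
    exact e_m.u8 _ (by omega) (by omega) (by omega)
  have e3 : Mapping.coupling_steps mem' m = Mapping.coupling_steps mem m := by
    simp only [vacc, voff]
    exact e_m.u16 _ (by omega) (by omega) (by omega)
  have hkc : (Block.mk (Mapping.chan mem m) (Off.sizeof.MappingChannel * nchan mem g.f)).Kept mem mem' := by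
    apply kept_arena _ c2.1
    intro e
    rw [e] at c2
    exact c2.2 (hT7c.mono h.maps.ext7c)
  have eatc : ∀ k, Mapping.chan_at mem' m k = Mapping.chan_at mem m k := by
    intro k
    unfold Mapping.chan_at
    rw [e1]
  have ech : ∀ k : Nat, (k : Int) < stb_vorbis.channels mem g.f → ∀ o, o < 3 →
      mem'.u8 (Mapping.chan_at mem m k + o) = mem.u8 (Mapping.chan_at mem m k + o) := by
    intro k hk o ho
    apply hkc.u8
    · simp only [vacc, voff]
      omega
    · simp only [nchan_def, vacc, voff] at hk ⊢
      omega
  have hcur : MapCur g (Since Ai A.1) mem' i 12 := by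
    refine ⟨?_, ?_, ?_, ?_, ?_, ?_, ?_⟩
    · rw [ecount]
      exact c1
    · rw [hma', e1, hn]
      exact c2
    · rw [hma', e2]
      exact c3
    · rw [hma', e3, hC]
      exact c4
    · intro h10
      omega
    · intro _ k hk'
      rw [hma'] at hk' ⊢
      rw [e3] at hk'
      have hkC : (k : Int) < stb_vorbis.channels mem g.f := by omega
      have := c6 (by omega) k hk'
      unfold Mapping.CouplingOK at this ⊢
      simp only [MappingChannel.magnitude, MappingChannel.angle, voff] at this ⊢
      rw [eatc k, ech k hkC 0 (by omega), ech k hkC 1 (by omega), hC]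
      exact this
    · intro _ k hk'
      rw [hma']
      rw [hC] at hk'
      have := c7 (by omega) k hk'
      unfold Mapping.MuxOK at this ⊢
      simp only [MappingChannel.mux, voff] at this ⊢
      rw [eatc k, ech k hk' 2 (by omega), e2]
      exact this
  have hsub : ∀ s : Nat, s < j → Mapping.SubmapOK mem' g.f m s := by
    intro s hs'
    have := h.sub s hs'
    unfold Mapping.SubmapOK at this ⊢
    have e4 : Mapping.submap_floor mem' m s = Mapping.submap_floor mem m s := by
      simp only [vacc, voff]
      exact e_fl.u8 _ (by omega) (by omega) (by omega)
    have e5 : Mapping.submap_residue mem' m s = Mapping.submap_residue mem m s := by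
      simp only [vacc, voff]
      exact e_rs.u8 _ (by omega) (by omega) (by omega)
    rw [e4, e5, hfl, hrc]
    exact this
  refine ⟨?_, ?_, ?_, ?_, ?_, ?_, ?_, h.code.trans e_text, h.shadow.untouched e_sh, ?_, ?_, hmid, hmaps, hma', hcur, hsub⟩
  · rw [e_saved.u64 _ (by omega) (by omega) hR]
    exact h.saved_rbx
  · rw [e_saved.u64 _ (by omega) (by omega) hR]
    exact h.saved_rbp
  · rw [e_saved.u64 _ (by omega) (by omega) hR]
    exact h.saved_r12
  · rw [e_saved.u64 _ (by omega) (by omega) hR]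
    exact h.saved_r13
  · rw [e_saved.u64 _ (by omega) (by omega) hR]
    exact h.saved_r14
  · rw [e_saved.u64 _ (by omega) (by omega) hR]
    exact h.saved_r15
  · rw [e_saved.u64 _ (by omega) (by omega) hR]
    exact h.saved_ra
  · -- SH7: the table `log2_4`
    intro k hk
    rw [← h.sh7 k hk]
    have eb : Vorbis.Globals.log2_4.beg = 0x120640 := rfl
    have et : (UInt64.ofNat (Vorbis.Globals.log2_4.beg + k)).toNat = 0x120640 + k := by
      rw [eb]
      exact toNat_addr _ (by omega)
    apply e_log.readLE
    · rw [et]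
      omega
    · rw [et]
      omega
    · rw [et]
      omega
  · -- the function's footprint
    apply h.same.step_same hs
    intro w hw' a ha1 ha2
    have := hw w hw'
    unfold OKSpan at this
    have hB := hext.B
    have hL := hext.L
    have m1 : (⟨g.RA - depth, g.RA⟩ : Span) ∈ footprint g := List.mem_cons_self
    have m2 : (objBlock g.f).span ∈ footprint g := List.mem_cons_of_mem _ List.mem_cons_self
    have m3 : (⟨g.A0.1.B, g.A0.1.B + g.A0.1.L⟩ : Span) ∈ footprint g :=
      List.mem_cons_of_mem _ (List.mem_cons_of_mem _ (List.mem_cons_of_mem _ List.mem_cons_self))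
    rcases this with t | t | t | t | t | t | t | t | t
    · exact ⟨_, m1, by simp only [depth]; omega, by simp only []; omega⟩
    · exact ⟨_, m1, by simp only [depth]; omega, by simp only []; omega⟩
    · exact ⟨_, m3, by simp only []; omega, by simp only []; omega⟩
    · exact ⟨_, m3, by simp only []; omega, by simp only []; omega⟩
    · exact ⟨_, m2, by simp only [vblock]; omega, by simp only [vblock, voff]; omega⟩
    · exact ⟨_, m2, by simp only [vblock]; omega, by simp only [vblock, voff]; omega⟩
    · exact ⟨_, m2, by simp only [vblock]; omega, by simp only [vblock, voff]; omega⟩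
    · exact ⟨_, m2, by simp only [vblock]; omega, by simp only [vblock, voff]; omega⟩
    · exact ⟨_, m2, by simp only [vblock]; omega, by simp only [vblock, voff]; omega⟩


/-- The live objects inside the function contain those of the callers. -/
theorem ownFrames_sub (g : Ghost) (others : List Obj) (o : Obj) (ho : o ∈ stackObjs g.frames ++ others) :
    o ∈ stackObjs g.frames' ++ others := by
  unfold Ghost.frames'
  rw [stackObjs_cons]
  rcases List.mem_append.mp ho with h1 | h2
  · exact List.mem_append_left _ (List.mem_append_right _ h1)
  · exact List.mem_append_right _ h2

/-- **The geometry at the entry of the segment**, from the entry assertion. -/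
theorem Geo.of_body {u₀ : State} {g : Ghost} {i : Nat} {A7 A7c Ai : Arena} {A : Arena × List Obj} {v : State}
    (hb : BodyR12 u₀ g i A7 A7c Ai A v) : Geo g A (mapAt g v.mem i) := by
  have fr := hb.loop.frame
  have hh := hb.loop.hand
  have hmid := hb.loop.mid
  obtain ⟨ra8, room, top⟩ := fr.ra
  simp only [depth] at room
  have hr := fr.r_eq.1
  simp only [steady] at hr
  have hobj : LiveIn A.2 g.frames' g.f Off.sizeof.stb_vorbis := hh.obj.mono (ownFrames_sub g A.2)
  have hwh := hobj.where_ fr.shadow fr.offText (by decide)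
  simp only [Off.sizeof.stb_vorbis] at hwh
  obtain ⟨hTA, _, _, hTin⟩ := table_facts hb.loop.maps hb.cur.lt
  have hToff := hmid.arena.blk_off_stack hTA
  have hTins := arena_inside hmid.arena hTA
  simp only [] at hToff hTins
  have hbd := hmid.arena.bounds
  have hat := hh.arenaText
  have e : L.textHi = 0x119d40 := rfl
  have hout := hh.objOut
  simp only [Off.sizeof.stb_vorbis] at hout
  have hmlo : stb_vorbis.mapping v.mem g.f ≤ mapAt g v.mem i := by
    unfold mapAt
    simp only [vacc, voff]
    omega
  have hlogB : g.Blk A ⟨0x120640, 16⟩ := by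
    apply runBlk_extra
    simp only [fixedBlocks, globalBlocks, List.mem_cons, true_or, or_true]
  have hfB : g.Blk A (objBlock g.f) := by
    apply runBlk_extra
    exact List.mem_cons_self
  have hflog : g.f + 1808 ≤ 0x120640 ∨ 0x120650 ≤ g.f := by
    rcases hmid.env.ok.apart _ _ hfB hlogB with e1 | hd
    · have := congrArg Block.size e1
      simp only [vblock, voff] at this
      omega
    · simp only [vblock, voff] at hd
      omega
  have halog := hh.outside ⟨0x120640, 16⟩ (by
    simp only [fixedBlocks, globalBlocks, List.mem_cons, true_or, or_true])
  simp only [] at halog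
  unfold mapAt at hmlo ⊢
  exact ⟨ra8, room, top, hr, hwh.1, hwh.2.1, f_where fr hh, by omega, hbd.2.2.2, by omega, by omega, by omega, hout,
    hflog, by omega⟩

/-- **The loop invariant at the entry of the segment** (`j = 0`). -/
theorem R12Inv.of_body {u₀ : State} {g : Ghost} {i : Nat} {A7 A7c Ai : Arena} {A : Arena × List Obj} {v : State}
    (hb : BodyR12 u₀ g i A7 A7c Ai A v) : R12Inv u₀ g i A7 A7c Ai A (mapAt g v.mem i) 0 v.mem :=
  { saved_rbx := hb.loop.frame.saved_rbx
    saved_rbp := hb.loop.frame.saved_rbp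
    saved_r12 := hb.loop.frame.saved_r12
    saved_r13 := hb.loop.frame.saved_r13
    saved_r14 := hb.loop.frame.saved_r14
    saved_r15 := hb.loop.frame.saved_r15
    saved_ra := hb.loop.frame.saved_ra
    code := hb.loop.frame.code
    shadow := hb.loop.frame.shadow
    sh7 := hb.loop.frame.sh7
    same := hb.loop.frame.same
    mid := hb.loop.mid
    maps := hb.loop.maps
    hm := rfl
    cur := hb.cur
    sub := fun s hs => absurd hs (Nat.not_lt_zero s) }


/-- **A span of the loop body's OWN stores**: a return address below the stack pointer, a spill slot, a byte of the two submap
arrays from index `j` on — and `error`'s window `eof`, `error` of `*f`, which `Bits` does not read. -/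
def OwnSpan (g : Ghost) (m j : Nat) (w : Span) : Prop :=
  (g.RA - 1888 ≤ w.lo ∧ w.hi ≤ g.R) ∨ (g.R + 0x10 ≤ w.lo ∧ w.hi ≤ g.R + 0x1c) ∨
  (m + 17 + j ≤ w.lo ∧ w.hi ≤ m + 33) ∨ (m + 33 + j ≤ w.lo ∧ w.hi ≤ m + 49) ∨
  (g.f + 136 ≤ w.lo ∧ w.hi ≤ g.f + 144)

/-- An own span is an `OKSpan`. -/
theorem OwnSpan.ok {g : Ghost} {m j : Nat} {w : Span} (h : OwnSpan g m j w) : OKSpan g m j w := by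
  unfold OwnSpan at h
  unfold OKSpan
  omega

/-- **FRAME OF THE LOOP INVARIANT over the body's own stores**: they miss `*f`, so `Bits` is kept (`Bits.frame_fields`). -/
theorem R12Inv.transfer_own {u₀ : State} {g : Ghost} {i : Nat} {A7 A7c Ai : Arena} {A : Arena × List Obj} {m j : Nat}
    {mem mem' : Mem} (h : R12Inv u₀ g i A7 A7c Ai A m j mem) (geo : Geo g A m)
    (hext : g.A0.1.Extends A.1) (hj : j ≤ 16)
    {ws : List Span} (hs : Mem.SameExcept ws mem mem') (hw : ∀ w, w ∈ ws → OwnSpan g m j w) :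
    R12Inv u₀ g i A7 A7c Ai A m j mem' := by
  apply h.transfer geo hext hj hs (fun w hw' => (hw w hw').ok)
  apply h.mid.bits.frame_fields
  obtain ⟨ra8, room, top, r_eq, f_lo, f_hi, f_off, arena_lo, arena_hi, m_lo, m_hi, m_off, f_out, f_log, a_log⟩ := geo
  apply Bits.SameFields.of_sameExcept hs
  · intro w hw'
    have := hw w hw'
    unfold OwnSpan at this
    omega
  · intro w hw'
    have := hw w hw'
    unfold OwnSpan at this
    omega
  · intro w hw'
    have := hw w hw'
    unfold OwnSpan at this
    omega
  · intro w hw'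
    have := hw w hw'
    unfold OwnSpan at this
    omega


/-- **`Frame` at a cut point from the loop invariant** and the machine facts of the state. -/
theorem R12Inv.frame {u₀ : State} {g : Ghost} {i : Nat} {A7 A7c Ai : Arena} {A : Arena × List Obj} {m j : Nat} {s : State}
    {pc : Word} (h : R12Inv u₀ g i A7 A7c Ai A m j s.mem)
    (he : AtEntry (conv u₀) L.start_decoder.entry depth g.ret g.e) (hrip : s.rip = pc) (hrsp : s.reg .rsp = addr g.R)
    (hinv : abiInv s) (hofft : ∀ o, o ∈ A.2 → L.textHi ≤ o.base) (hext : g.A0.1.Extends A.1)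
    (hcallers : ∀ bF, bF ∈ g.frames → g.RA + 8 ≤ bF.1) : Frame u₀ g pc A s :=
  { entry := he
    rip := hrip
    rsp := hrsp
    shadowIdx := h.mid.consts.shadowIdx
    saved_rbx := h.saved_rbx
    saved_rbp := h.saved_rbp
    saved_r12 := h.saved_r12
    saved_r13 := h.saved_r13
    saved_r14 := h.saved_r14
    saved_r15 := h.saved_r15
    saved_ra := h.saved_ra
    code := h.code
    inv := hinv
    shadow := h.shadow
    offText := hofft
    ext := hext
    callers := hcallers
    sh7 := h.sh7
    same := h.same }

/-- **The exit of the submap loop** (`submaps ≤ j`): record `i` is complete (MP6 from the loop's invariant), MAPS(i + 1) with the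
present arena as the snapshot of the next iteration. -/
theorem R12Inv.maps_succ {u₀ : State} {g : Ghost} {i : Nat} {A7 A7c Ai : Arena} {A : Arena × List Obj} {m j : Nat} {mem : Mem}
    (h : R12Inv u₀ g i A7 A7c Ai A m j mem) (hexit : Mapping.submaps mem m ≤ j) :
    MapTrans A7 A7c A.1 A.1 mem g.f (i + 1) := by
  have hlt := h.cur.lt
  have hmm : stb_vorbis.mapping_at mem g.f i = m := h.hm
  refine ⟨h.maps.ext7, h.maps.ext7c.trans h.maps.exti, Arena.Extends.refl _, by omega, h.maps.MP1, h.maps.MP1_block, ?_⟩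
  intro i' hi'
  by_cases e : i' = i
  · subst e
    obtain ⟨_, c2, c3, c4, _, c6, c7⟩ := h.cur
    have hma : mapAt g mem i' = m := h.hm
    rw [hma] at c2 c3 c4 c6 c7
    rw [hmm]
    refine ⟨c2.older h.maps.ext7c, c3, c4, c6 (by omega), c7 (by omega), ?_⟩
    intro s hs
    exact h.sub s (by omega)
  · exact MappingAtOK.mono (h.maps.record i' (by omega)) (fun _ hB => hB.mono h.maps.exti)


/-- **An error exit of the loop** (`call error ; jmp 113b22`): SD.ERR. H5 from MAPS(i), H2 / H3 from the finished residue group. -/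
theorem R12Inv.failed {u₀ : State} {g : Ghost} {i : Nat} {A7 A7c Ai : Arena} {A : Arena × List Obj} {m j : Nat} {mem : Mem}
    (h : R12Inv u₀ g i A7 A7c Ai A m j mem) : Failed g.len g.f (g.Live A) A mem := by
  have h5 : H5 (g.Blk A) mem g.f :=
    H5.mono (MappingDeinitOK.h5 h.maps.upTo.deinit h.maps.MP1.2) (fun _ hB => runBlk_setup hB)
  exact h.mid.failed (by omega) (h.mid.h2_done (by omega)) (h.mid.h3_done (by omega)) h5


/-- The loop test `cmp eax, r13d ; jg` (0x116549), both readings: `j < submaps` is the signed comparison of the walker. -/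
theorem loop_cond (j x : Nat) (hj : j ≤ 16) (hx : x ≤ 16) :
    ((Word.part Width.w32 (addr j)).toInt < (BitVec.zeroExtend 32 (BitVec.ofNat 8 x)).toInt) ↔ j < x := by
  have e1 : (Word.part Width.w32 (addr j)).toNat = j := by
    rw [Asan.part32_toNat, toNat_addr j (by omega)]
    omega
  have e2 : (BitVec.zeroExtend 32 (BitVec.ofNat 8 x)).toNat = x := by
    simp only [BitVec.truncate_eq_setWidth, BitVec.toNat_setWidth, BitVec.toNat_ofNat]
    omega
  rw [Vorbis.Spec.toInt_of_lt _ (by omega), Vorbis.Spec.toInt_of_lt _ (by omega), e1, e2]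
  omega


/-- `submaps` of the record under construction is kept by the body's own stores (byte `m + 16` lies below the two arrays). -/
theorem submaps_own {g : Ghost} {A : Arena × List Obj} {m j : Nat} {mem mem' : Mem} (geo : Geo g A m)
    {ws : List Span} (hs : Mem.SameExcept ws mem mem') (hw : ∀ w, w ∈ ws → OwnSpan g m j w) :
    Mapping.submaps mem' m = Mapping.submaps mem m := by
  obtain ⟨ra8, room, top, r_eq, f_lo, f_hi, f_off, arena_lo, arena_hi, m_lo, m_hi, m_off, f_out, f_log, a_log⟩ := geo
  have e_m : Mem.EqOn m (m + 17) mem mem' := by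
    apply hs.eqOn
    intro w hw'
    have := hw w hw'
    unfold OwnSpan at this
    omega
  simp only [vacc, voff]
  exact e_m.u8 _ (by omega) (by omega) (by omega)

/-- **A cut point of the loop body**: the ghost facts of the activation, the registers that live across the whole body (rsp, rbp = f,
rbx = m, r13d = j), the loop invariant on the memory, the mapping loop's counter slot `[R + 10H]`. -/
structure Pt (u₀ : State) (g : Ghost) (i : Nat) (A7 A7c Ai : Arena) (A : Arena × List Obj) (m j : Nat) (pc : Word)
    (v : State) : Prop where
  entry : AtEntry (conv u₀) L.start_decoder.entry depth g.ret g.e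
  geo : Geo g A m
  hand : g.Hand A
  offText : ∀ o, o ∈ A.2 → L.textHi ≤ o.base
  ext : g.A0.1.Extends A.1
  callers : ∀ bF, bF ∈ g.frames → g.RA + 8 ≤ bF.1
  rip : v.rip = pc
  rsp : v.reg .rsp = g.e.reg .rsp - 1480
  rbp : v.reg .rbp = addr g.f
  rbx : v.reg .rbx = addr m
  r13 : v.reg .r13 = addr j
  j_le : j ≤ 16
  inv : R12Inv u₀ g i A7 A7c Ai A m j v.mem
  cnt : v.mem.readLE (g.e.reg .rsp - 1464) 4 = i
  abi : abiInv v

/-- The precondition of a reader at a call state of the loop body. -/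
theorem reader_pre {u₀ : State} {g : Ghost} {i : Nat} {A7 A7c Ai : Arena} {A : Arena × List Obj} {m j : Nat} {s : State}
    (h : R12Inv u₀ g i A7 A7c Ai A m j s.mem) (hh : g.Hand A) (hofft : ∀ o, o ∈ A.2 → L.textHi ≤ o.base)
    (hrsp : (s.reg .rsp).toNat + 8 = g.R) (hrdi : (s.reg .rdi).toNat = g.f) :
    ReaderPre A.2 g.frames' (g.Blk A) g.len s := by
  refine ⟨⟨?_, hofft⟩, ?_, ?_⟩
  · rw [hrsp]
    exact h.shadow
  · rw [hrdi]
    exact ⟨h.mid.env.live, hh.obj.mono (ownFrames_sub g A.2), fun hl => (hh.inp hl).mono (ownFrames_sub g A.2)⟩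
  · rw [hrdi]
    exact h.mid.bits

/-- The footprint of `get_bits` called from the steady stack pointer is made of `OKSpan`s. -/
theorem getbits_spans {g : Ghost} {A : Arena × List Obj} {m j : Nat} (geo : Geo g A m) :
    ∀ w, w ∈ [(⟨(g.e.reg .rsp).toNat - 1488 - 352, (g.e.reg .rsp).toNat - 1488⟩ : Span), ⟨g.f + 48, g.f + 56⟩,
      ⟨g.f + 84, g.f + 96⟩, ⟨g.f + 136, g.f + 144⟩, ⟨g.f + 1484, g.f + 1749⟩, ⟨g.f + 1752, g.f + 1784⟩] →
      OKSpan g m j w := by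
  intro w hw
  have h1 := geo.r_eq
  have h2 := geo.room
  have hRA : g.RA = (g.e.reg .rsp).toNat := rfl
  simp only [List.mem_cons, List.mem_nil_iff, or_false] at hw
  unfold OKSpan
  rcases hw with rfl | rfl | rfl | rfl | rfl | rfl <;> simp only [] <;> omega

/-- The push of a return address below the steady stack pointer is an own span. -/
theorem push_span {g : Ghost} {A : Arena × List Obj} {m j : Nat} (geo : Geo g A m) :
    ∀ w, w ∈ [(⟨(g.e.reg .rsp).toNat - 1488, (g.e.reg .rsp).toNat - 1480⟩ : Span)] → OwnSpan g m j w := by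
  intro w hw
  simp only [List.mem_singleton] at hw
  subst hw
  have h1 := geo.r_eq
  have h2 := geo.room
  have hRA : g.RA = (g.e.reg .rsp).toNat := rfl
  unfold OwnSpan
  simp only []
  omega

/-- The mapping loop's counter slot `[R + 10H]` is kept by `get_bits` called from the steady stack pointer. -/
theorem cnt_getbits {g : Ghost} {A : Arena × List Obj} {m i : Nat} (geo : Geo g A m) {mem mem' : Mem}
    (hs : Mem.SameExcept [(⟨(g.e.reg .rsp).toNat - 1488 - 352, (g.e.reg .rsp).toNat - 1488⟩ : Span), ⟨g.f + 48, g.f + 56⟩,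
      ⟨g.f + 84, g.f + 96⟩, ⟨g.f + 136, g.f + 144⟩, ⟨g.f + 1484, g.f + 1749⟩, ⟨g.f + 1752, g.f + 1784⟩] mem mem')
    (h : mem.readLE (g.e.reg .rsp - 1464) 4 = i) : mem'.readLE (g.e.reg .rsp - 1464) 4 = i := by
  have h1 := geo.r_eq
  have h2 := geo.room
  have h3 := geo.top
  have h4 := geo.f_off
  have hRA : g.RA = (g.e.reg .rsp).toNat := rfl
  have ea : (g.e.reg .rsp - 1464).toNat = (g.e.reg .rsp).toNat - 1464 := by u_omega
  rw [hs.readLE _ 4 (by omega) ?_]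
  · exact h
  · intro w hw
    simp only [List.mem_cons, List.mem_nil_iff, or_false] at hw
    rcases hw with rfl | rfl | rfl | rfl | rfl | rfl <;> simp only [] <;> omega

/-- **0x116545 (cut310, the head of loop 4132) → 0x115f22 (`AtR8`, `++i`) | 0x11648f (cut305, the return of the first
`get_bits(f, 8)`, with `j < submaps ≤ 16`)**. -/
theorem seg_head {Lay : Layout} (hLay : Lay.hi = 0x1000000) {μ : Microarch} (hμ : UserX.MicroOK μ) {u₀ : State}
    (hcode : HasCodeNat Lay u₀ Vorbis.L.start_decoder.entry Vorbis.Code.code_start_decoder.nat Vorbis.L.start_decoder.size)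
    (h_get_bits : ∀ (others : List Obj) (frames : List (Nat × FrameLayout)) (Blk : Block → Prop) (len : Nat),
      Calls Lay μ Vorbis.WayInv (Vorbis.conv u₀) Vorbis.L.get_bits.entry (Vorbis.Spec.get_bits.spec others frames Blk len))
    {g : Ghost} {i : Nat} {A7 A7c Ai : Arena} {A : Arena × List Obj} {m j : Nat} {v : State}
    (hp : Pt u₀ g i A7 A7c Ai A m j Vorbis.L.start_decoder.cut310 v) :
    ReachVia Lay μ WayInv v (fun w => AtR8 u₀ g (i + 1) w ∨
      (Pt u₀ g i A7 A7c Ai A m j Vorbis.L.start_decoder.cut305 w ∧ j < 16)) := by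
  obtain ⟨he, geo, hh, hofft, hext, hcallers, w_rip, b_rsp, b_rbp, b_rbx, b_r13, hj16, hcore, hcnt, habi⟩ := hp
  have he0 := he
  v_entry he
  have he_room' : 7340032 + 1888 ≤ (g.e.reg .rsp).toNat := he_room
  have he_stack' : Lay.Has (g.e.reg .rsp - 1888) (1888 + 8) := he_stack
  clear he_room he_stack
  have hgb := h_get_bits A.2 g.frames' (g.Blk A) g.len
  have hR : g.R = (g.e.reg .rsp).toNat - 1480 := rfl
  have hRA : g.RA = (g.e.reg .rsp).toNat := rfl
  have hslot_addr : addr (g.R + 16) = g.e.reg .rsp - 1464 := by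
    symm
    apply eq_addr
    u_omega
  have w_eq : Mem.EqOn Vorbis.L.textLo Vorbis.L.textHi u₀.mem v.mem := hcore.code
  have hdf : v.flags .df = false := (show abiInv _ from habi).1
  have hmx : v.mxcsr &&& 0x1F80 = 0x1F80 := (show abiInv _ from habi).2
  have hsse := Vorbis.sseOK_of_abiInv habi
  have hld : v.mem.readLE (addr m + 16) 1 = Mapping.submaps v.mem m := by
    simp only [vfield, vacc, voff]
  have hm_lo : 0x119d40 ≤ m := by
    have h1 := geo.arena_lo
    have h2 := geo.m_lo
    omega
  have hm_hi : m + 56 ≤ 0xC00000 := by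
    have h1 := geo.arena_hi
    have h2 := geo.m_hi
    omega
  have hm_off := geo.m_off
  have hasm : Lay.Has (addr m) 56 := by
    unfold Layout.Has Layout.lo
    rw [hLay, toNat_addr m (by omega)]
    omega
  have h16 : Mapping.submaps v.mem m ≤ 16 := by
    have := hcore.cur.MP3.2
    rw [hcore.hm] at this
    exact this
  have hiff := loop_cond j _ hj16 h16
  u_walk hcode [hμ.vendor] until [Vorbis.L.start_decoder.cut310, Vorbis.L.start_decoder.cut270, Vorbis.L.start_decoder.cut4] span [Vorbis.L.textLo, Vorbis.L.textHi] side (v_side)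
  · -- 0x11648a `call get_bits` (stb_vorbis_fixed.c:4133): DF and the MXCSR masks
    v_inv
  · -- the precondition of `get_bits(f, 8)`: the loop invariant over the push of the return address
    have hs : Mem.SameExcept [⟨(g.e.reg .rsp).toNat - 1488, (g.e.reg .rsp).toNat - 1480⟩] v.mem s_11648a.mem := by
      u_same
    have hcore1 := hcore.transfer_own geo hext hj16 hs (push_span geo)
    have ersp : (s_11648a.reg .rsp).toNat + 8 = g.R := by
      rw [w_rsp]
      u_omega
    have erdi : (s_11648a.reg .rdi).toNat = g.f := by
      have := geo.f_hi
      rw [w_rdi, toNat_addr g.f (by omega)]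
    refine ⟨reader_pre hcore1 hh hofft ersp erdi, ?_⟩
    rw [Vorbis.Spec.bitsArg_def, w_rsi]
    decide
  · -- 0x11648f (cut305), the state `get_bits` returned: the loop invariant over the callee's footprint
    have hs : Mem.SameExcept [⟨(g.e.reg .rsp).toNat - 1488, (g.e.reg .rsp).toNat - 1480⟩] v.mem s_11648a.mem := by
      rw [w_mem_11648a]
      u_same
    have hcore1 := hcore.transfer_own geo hext hj16 hs (push_span geo)
    have ersp : (g.e.reg .rsp - 1488).toNat = (g.e.reg .rsp).toNat - 1488 := by u_omega
    have erdi : (addr g.f).toNat = g.f := by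
      have := geo.f_hi
      exact toNat_addr g.f (by omega)
    simp only [X86.User.Spec.footprint, vspec, w_rsp_11648a, w_rdi_11648a, ersp, erdi] at w_same
    have hbits : Bits (g.Blk A) g.len s_11648ar.mem g.f := by
      have := w_post.bits.bits
      rw [w_rdi_11648a, erdi] at this
      exact this
    have hcore2 := hcore1.transfer geo hext hj16 w_same (getbits_spans geo) hbits
    have hjlt : j < 16 := by
      have : j < Mapping.submaps v.mem m := hiff.mp hbr_11654c
      omega
    have hcnt1 : s_11648a.mem.readLE (g.e.reg .rsp - 1464) 4 = i := by
      rw [w_mem_11648a]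
      u_frame hcnt
    have hcnt2 := cnt_getbits geo w_same hcnt1
    refine ReachVia.done (Or.inr ⟨⟨he0, geo, hh, hofft, hext, hcallers, w_rip, w_rsp, ?_, ?_, ?_, hj16, hcore2, hcnt2, w_inv⟩, hjlt⟩)
    · rw [w_kept.get .rbp rfl]
      exact b_rbp
    · rw [w_kept.get .rbx rfl]
      exact b_rbx
    · rw [w_kept.get .r13 rfl]
      exact b_r13
  · -- 0x11655a → 0x115f22 (stb_vorbis_fixed.c:4095 `++i`): the exit of the submap loop, to the head of the mapping loop
    have hs : Mem.SameExcept [⟨(g.e.reg .rsp).toNat - 1464, (g.e.reg .rsp).toNat - 1460⟩] v.mem s_11655a.mem := by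
      u_same
    have hown : ∀ w, w ∈ [(⟨(g.e.reg .rsp).toNat - 1464, (g.e.reg .rsp).toNat - 1460⟩ : Span)] →
        OwnSpan g m j w := by
      intro w hw
      simp only [List.mem_singleton] at hw
      subst hw
      have := geo.r_eq
      unfold OwnSpan
      simp only []
      omega
    have hcore' := hcore.transfer_own geo hext hj16 hs hown
    have hsubs := submaps_own geo hs hown
    have hexit : Mapping.submaps s_11655a.mem m ≤ j := by
      rw [hsubs]
      have : ¬ j < Mapping.submaps v.mem m := fun hlt => hbr_11654c (hiff.mpr hlt)
      omega
    have hrsp : s_11655a.reg .rsp = addr g.R := by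
      rw [w_kept .rsp rfl, b_rsp, hR, ← addr_sub_lit (g.e.reg .rsp).toNat 1480 (by omega), addr_toNat]
    have hinv : abiInv s_11655a := by v_inv
    refine ReachVia.done (Or.inl ⟨A7, A7c, A, ?_⟩)
    refine ⟨hcore'.frame he0 w_rip hrsp hinv hofft hext hcallers, hh, hcore'.mid, ?_, ?_, ?_, hcore'.maps_succ hexit⟩
    · rw [w_kept .rbp rfl]
      exact b_rbp
    · show s_11655a.mem.readLE (addr (g.R + 16)) 4 = i + 1
      have hi64 : i < 64 := by
        have h1 := hcore.maps.MP1
        have h2 := hcore.cur.lt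
        omega
      rw [hslot_addr, w_mem, Mem.readLE_writeLE_same _ _ _ _ (by decide)]
      simp only [BitVec.toNat_add, BitVec.toNat_ofNat, BitVec.toNat_ofNat]
      omega
    · have := hcore'.cur.lt
      omega

/-- **0x11648f (cut305) → 0x11649c (cut306, the return of the second `get_bits(f, 8)`: `submap_floor[j]` in eax)**
(stb_vorbis_fixed.c:4134). -/
theorem seg_floor_call {Lay : Layout} (hLay : Lay.hi = 0x1000000) {μ : Microarch} (hμ : UserX.MicroOK μ) {u₀ : State}
    (hcode : HasCodeNat Lay u₀ Vorbis.L.start_decoder.entry Vorbis.Code.code_start_decoder.nat Vorbis.L.start_decoder.size)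
    (h_get_bits : ∀ (others : List Obj) (frames : List (Nat × FrameLayout)) (Blk : Block → Prop) (len : Nat),
      Calls Lay μ Vorbis.WayInv (Vorbis.conv u₀) Vorbis.L.get_bits.entry (Vorbis.Spec.get_bits.spec others frames Blk len))
    {g : Ghost} {i : Nat} {A7 A7c Ai : Arena} {A : Arena × List Obj} {m j : Nat} {v : State}
    (hp : Pt u₀ g i A7 A7c Ai A m j Vorbis.L.start_decoder.cut305 v) :
    ReachVia Lay μ WayInv v (fun w => Pt u₀ g i A7 A7c Ai A m j Vorbis.L.start_decoder.cut306 w) := by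
  obtain ⟨he, geo, hh, hofft, hext, hcallers, w_rip, b_rsp, b_rbp, b_rbx, b_r13, hj16, hcore, hcnt, habi⟩ := hp
  have he0 := he
  v_entry he
  have he_room' : 7340032 + 1888 ≤ (g.e.reg .rsp).toNat := he_room
  have he_stack' : Lay.Has (g.e.reg .rsp - 1888) (1888 + 8) := he_stack
  clear he_room he_stack
  have hgb := h_get_bits A.2 g.frames' (g.Blk A) g.len
  have hR : g.R = (g.e.reg .rsp).toNat - 1480 := rfl
  have hRA : g.RA = (g.e.reg .rsp).toNat := rfl
  have w_eq : Mem.EqOn Vorbis.L.textLo Vorbis.L.textHi u₀.mem v.mem := hcore.code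
  have hdf : v.flags .df = false := (show abiInv _ from habi).1
  have hmx : v.mxcsr &&& 0x1F80 = 0x1F80 := (show abiInv _ from habi).2
  have hsse := Vorbis.sseOK_of_abiInv habi
  u_walk hcode [hμ.vendor] until [Vorbis.L.start_decoder.cut310, Vorbis.L.start_decoder.cut270, Vorbis.L.start_decoder.cut4] span [Vorbis.L.textLo, Vorbis.L.textHi] side (v_side)
  · -- 0x116497 `call get_bits` (stb_vorbis_fixed.c:4134): DF and the MXCSR masks
    v_inv
  · -- the precondition of `get_bits(f, 8)`: the loop invariant over the push of the return address
    have hs : Mem.SameExcept [⟨(g.e.reg .rsp).toNat - 1488, (g.e.reg .rsp).toNat - 1480⟩] v.mem s_116497.mem := by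
      u_same
    have hcore1 := hcore.transfer_own geo hext hj16 hs (push_span geo)
    have ersp : (s_116497.reg .rsp).toNat + 8 = g.R := by
      rw [w_rsp]
      u_omega
    have erdi : (s_116497.reg .rdi).toNat = g.f := by
      have := geo.f_hi
      rw [w_rdi, toNat_addr g.f (by omega)]
    refine ⟨reader_pre hcore1 hh hofft ersp erdi, ?_⟩
    rw [Vorbis.Spec.bitsArg_def, w_rsi]
    decide
  · -- 0x11649c (cut306), the state `get_bits` returned: the loop invariant over the callee's footprint
    have hs : Mem.SameExcept [⟨(g.e.reg .rsp).toNat - 1488, (g.e.reg .rsp).toNat - 1480⟩] v.mem s_116497.mem := by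
      rw [w_mem_116497]
      u_same
    have hcore1 := hcore.transfer_own geo hext hj16 hs (push_span geo)
    have ersp : (g.e.reg .rsp - 1488).toNat = (g.e.reg .rsp).toNat - 1488 := by u_omega
    have erdi : (addr g.f).toNat = g.f := by
      have := geo.f_hi
      exact toNat_addr g.f (by omega)
    simp only [X86.User.Spec.footprint, vspec, w_rsp_116497, w_rdi_116497, ersp, erdi] at w_same
    have hbits : Bits (g.Blk A) g.len s_116497r.mem g.f := by
      have := w_post.bits.bits
      rw [w_rdi_116497, erdi] at this
      exact this
    have hcore2 := hcore1.transfer geo hext hj16 w_same (getbits_spans geo) hbits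
    have hcnt1 : s_116497.mem.readLE (g.e.reg .rsp - 1464) 4 = i := by
      rw [w_mem_116497]
      u_frame hcnt
    have hcnt2 := cnt_getbits geo w_same hcnt1
    refine ReachVia.done ⟨he0, geo, hh, hofft, hext, hcallers, w_rip, w_rsp, ?_, ?_, ?_, hj16, hcore2, hcnt2, w_inv⟩
    · rw [w_kept.get .rbp rfl]
      exact b_rbp
    · rw [w_kept.get .rbx rfl]
      exact b_rbx
    · rw [w_kept.get .r13 rfl]
      exact b_r13

/-- **A check site inside the record under construction**: `k` bytes at offset `off` of `m(i)` lie inside the mapping table, a live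
block of the arena. -/
theorem R12Inv.site {u₀ : State} {g : Ghost} {i : Nat} {A7 A7c Ai : Arena} {A : Arena × List Obj} {m j : Nat} {mem : Mem}
    (h : R12Inv u₀ g i A7 A7c Ai A m j mem) (off k : Nat) (hk : 1 ≤ k) (ho : off + k ≤ 56) :
    Site (Live (stackObjs g.frames' ++ A.2)) (m + off) k := by
  obtain ⟨hTA, _, _, hTin⟩ := table_facts h.maps h.cur.lt
  have hmm : stb_vorbis.mapping_at mem g.f i = m := h.hm
  have hmdef : m = stb_vorbis.mapping mem g.f + 56 * i := by
    rw [← hmm]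
    simp only [vacc, voff]
  rw [hmm] at hTin
  simp only [voff] at hTin
  refine h.mid.arena.site_block (fun _ ho' => List.mem_append_right _ ho') hTA ?_ ?_ hk
  · simp only []
    omega
  · simp only [voff]
    omega

/-- The own stores of 0x11649c – 0x1164c2 (two pushed return addresses, the spill `[R + 18H]`, the byte `submap_floor[j]`) are own
spans. -/
theorem floor_spans {g : Ghost} {A : Arena × List Obj} {m j : Nat} (geo : Geo g A m) (hj : j < 16) :
    ∀ w, w ∈ [(⟨(g.e.reg .rsp).toNat - 1488, (g.e.reg .rsp).toNat - 1480⟩ : Span),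
      ⟨(g.e.reg .rsp).toNat - 1456, (g.e.reg .rsp).toNat - 1452⟩, ⟨m + 17 + j, m + 18 + j⟩] → OwnSpan g m j w := by
  intro w hw
  have h1 := geo.r_eq
  have h2 := geo.room
  have hRA : g.RA = (g.e.reg .rsp).toNat := rfl
  simp only [List.mem_cons, List.mem_nil_iff, or_false] at hw
  unfold OwnSpan
  rcases hw with rfl | rfl | rfl <;> simp only [] <;> omega

/-- **A cut point of the loop body after the store of `submap_floor[j]`** (cut307): `Pt` with `j < 16`, `r12 = j` and
`r15 = &m->submap_floor[j]`. -/
structure PtC (u₀ : State) (g : Ghost) (i : Nat) (A7 A7c Ai : Arena) (A : Arena × List Obj) (m j : Nat) (pc : Word)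
    (v : State) : Prop where
  pt : Pt u₀ g i A7 A7c Ai A m j pc v
  j_lt : j < 16
  r12 : v.reg .r12 = addr j
  r15 : v.reg .r15 = addr (m + 17 + j)

/-- **0x11649c (cut306) → 0x1164c7 (cut307, the return of the third `get_bits(f, 8)`)**: the spill of eax to `[R + 18H]`, the
check site 0x1164ab (store1 at `m + 17 + j`, inside the record), the byte store `m->submap_floor[j]`, the call
(stb_vorbis_fixed.c:4134 – 4135). -/
theorem seg_floor_store {Lay : Layout} (hLay : Lay.hi = 0x1000000) {μ : Microarch} (hμ : UserX.MicroOK μ) {u₀ : State}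
    (hcode : HasCodeNat Lay u₀ Vorbis.L.start_decoder.entry Vorbis.Code.code_start_decoder.nat Vorbis.L.start_decoder.size)
    (h_get_bits : ∀ (others : List Obj) (frames : List (Nat × FrameLayout)) (Blk : Block → Prop) (len : Nat),
      Calls Lay μ Vorbis.WayInv (Vorbis.conv u₀) Vorbis.L.get_bits.entry (Vorbis.Spec.get_bits.spec others frames Blk len))
    (hstore1 : Asan.SmallCheck Lay μ Vorbis.WayInv (Vorbis.CodeOK u₀) [.rax, .rdx] 1 Vorbis.L.__asan_store1_noabort.entry)
    {g : Ghost} {i : Nat} {A7 A7c Ai : Arena} {A : Arena × List Obj} {m j : Nat} {v : State}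
    (hp : Pt u₀ g i A7 A7c Ai A m j Vorbis.L.start_decoder.cut306 v) (hjlt : j < 16) :
    ReachVia Lay μ WayInv v (fun w => PtC u₀ g i A7 A7c Ai A m j Vorbis.L.start_decoder.cut307 w) := by
  have b_r13 : v.reg .r13 = UInt64.ofNat j := hp.r13
  obtain ⟨he, geo, hh, hofft, hext, hcallers, w_rip, b_rsp, b_rbp, b_rbx, -, hj16, hcore, hcnt, habi⟩ := hp
  have he0 := he
  v_entry he
  have he_room' : 7340032 + 1888 ≤ (g.e.reg .rsp).toNat := he_room
  have he_stack' : Lay.Has (g.e.reg .rsp - 1888) (1888 + 8) := he_stack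
  clear he_room he_stack
  have hgb := h_get_bits A.2 g.frames' (g.Blk A) g.len
  have hR : g.R = (g.e.reg .rsp).toNat - 1480 := rfl
  have hRA : g.RA = (g.e.reg .rsp).toNat := rfl
  have w_eq : Mem.EqOn Vorbis.L.textLo Vorbis.L.textHi u₀.mem v.mem := hcore.code
  have hdf : v.flags .df = false := (show abiInv _ from habi).1
  have hmx : v.mxcsr &&& 0x1F80 = 0x1F80 := (show abiInv _ from habi).2
  have hsse := Vorbis.sseOK_of_abiInv habi
  obtain ⟨z, b_rax⟩ : ∃ z, v.reg .rax = z := ⟨_, rfl⟩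
  have hm_lo : 0x119d40 ≤ m := by
    have h1 := geo.arena_lo
    have h2 := geo.m_lo
    omega
  have hm_hi : m + 56 ≤ 0xC00000 := by
    have h1 := geo.arena_hi
    have h2 := geo.m_hi
    omega
  have hm_off := geo.m_off
  have hmn : (addr m).toNat = m := toNat_addr m (by omega)
  have hjn : (UInt64.ofNat j).toNat = j := toNat_addr j (by omega)
  have hj31 : j < 2 ^ 31 := by omega
  u_walk hcode [hμ.vendor, cnt32_sext j hj31, cnt32_sext_bv j hj31, cnt32_part j] until [Vorbis.L.start_decoder.cut310, Vorbis.L.start_decoder.cut270, Vorbis.L.start_decoder.cut4] span [Vorbis.L.textLo, Vorbis.L.textHi] side (v_side)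
  case check_1164ab =>
    -- 0x1164ab: the store of `m->submap_floor[j]` (m + 17 + j) lies inside the record, a part of the mapping table
    have hun : ShadowUntouched v.mem s_1164ab.mem := by v_untouched
    exact Vorbis.Spec.check_site hcore.shadow hun (hcore.site (17 + j) 1 (by omega) (by omega)) (by u_omega)
  case call_inv => v_inv
  case pre_1164c2 =>
    -- the precondition of `get_bits(f, 8)`: the loop invariant over the own stores
    have hs : Mem.SameExcept [⟨(g.e.reg .rsp).toNat - 1488, (g.e.reg .rsp).toNat - 1480⟩,
        ⟨(g.e.reg .rsp).toNat - 1456, (g.e.reg .rsp).toNat - 1452⟩, ⟨m + 17 + j, m + 18 + j⟩] v.mem s_1164c2.mem := by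
      u_same
    have hcore1 := hcore.transfer_own geo hext hj16 hs (floor_spans geo hjlt)
    have ersp : (s_1164c2.reg .rsp).toNat + 8 = g.R := by
      rw [w_rsp]
      u_omega
    have erdi : (s_1164c2.reg .rdi).toNat = g.f := by
      have := geo.f_hi
      rw [w_rdi, toNat_addr g.f (by omega)]
    refine ⟨reader_pre hcore1 hh hofft ersp erdi, ?_⟩
    rw [Vorbis.Spec.bitsArg_def, w_rsi]
    decide
  case cont =>
    -- 0x1164c7 (cut307), the state `get_bits` returned: the loop invariant over the own stores and the callee's footprint
    have hs : Mem.SameExcept [⟨(g.e.reg .rsp).toNat - 1488, (g.e.reg .rsp).toNat - 1480⟩,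
        ⟨(g.e.reg .rsp).toNat - 1456, (g.e.reg .rsp).toNat - 1452⟩, ⟨m + 17 + j, m + 18 + j⟩] v.mem s_1164c2.mem := by
      rw [w_mem_1164c2]
      u_same
    have hcore1 := hcore.transfer_own geo hext hj16 hs (floor_spans geo hjlt)
    have ersp : (g.e.reg .rsp - 1488).toNat = (g.e.reg .rsp).toNat - 1488 := by u_omega
    have erdi : (addr g.f).toNat = g.f := by
      have := geo.f_hi
      exact toNat_addr g.f (by omega)
    simp only [X86.User.Spec.footprint, vspec, w_rsp_1164c2, w_rdi_1164c2, ersp, erdi] at w_same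
    have hbits : Bits (g.Blk A) g.len s_1164c2r.mem g.f := by
      have := w_post.bits.bits
      rw [w_rdi_1164c2, erdi] at this
      exact this
    have hcore2 := hcore1.transfer geo hext hj16 w_same (getbits_spans geo) hbits
    have hcnt1 : s_1164c2.mem.readLE (g.e.reg .rsp - 1464) 4 = i := by
      rw [w_mem_1164c2]
      u_frame hcnt
    have hcnt2 := cnt_getbits geo w_same hcnt1
    have hr15 : s_1164c2r.reg .r15 = addr (m + 17 + j) := by
      rw [w_r15]
      apply eq_addr
      u_omega
    refine ReachVia.done ⟨⟨he0, geo, hh, hofft, hext, hcallers, w_rip, w_rsp, ?_, ?_, ?_, hj16, hcore2, hcnt2, w_inv⟩,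
      hjlt, w_r12, hr15⟩
    · rw [w_kept.get .rbp rfl]
      exact b_rbp
    · rw [w_kept.get .rbx rfl]
      exact b_rbx
    · rw [w_kept.get .r13 rfl]
      exact b_r13

/-- The loop invariant for `j + 1`: MP6 of submap `j` has been tested. -/
theorem R12Inv.succ {u₀ : State} {g : Ghost} {i : Nat} {A7 A7c Ai : Arena} {A : Arena × List Obj} {m j : Nat} {mem : Mem}
    (h : R12Inv u₀ g i A7 A7c Ai A m j mem) (hs : Mapping.SubmapOK mem g.f m j) :
    R12Inv u₀ g i A7 A7c Ai A m (j + 1) mem := by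
  obtain ⟨h1, h2, h3, h4, h5, h6, h7, h8, h9, h10, h11, h12, h13, h14, h15, h16⟩ := h
  refine ⟨h1, h2, h3, h4, h5, h6, h7, h8, h9, h10, h11, h12, h13, h14, h15, ?_⟩
  intro s hs'
  by_cases e : s = j
  · subst e
    exact hs
  · exact h16 s (by omega)

/-- The signed value of a zero-extended byte. -/
theorem zbyte_toInt (b : Nat) (hb : b < 256) : (BitVec.zeroExtend 32 (BitVec.ofNat 8 b)).toInt = (b : Int) := by
  have e2 : (BitVec.zeroExtend 32 (BitVec.ofNat 8 b)).toNat = b := by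
    simp only [BitVec.truncate_eq_setWidth, BitVec.toNat_setWidth, BitVec.toNat_ofNat]
    omega
  rw [Vorbis.Spec.toInt_of_lt _ (by omega), e2]

/-- The byte that `mov [m8], al` stores after `movzx eax, byte [..]`. -/
theorem byte_val (x : Nat) (hx : x < 256) : (BitVec.setWidth 8 (BitVec.zeroExtend 32 (BitVec.ofNat 8 x))).toNat = x := by
  simp only [BitVec.truncate_eq_setWidth, BitVec.toNat_setWidth, BitVec.toNat_ofNat]
  omega

/-- The signed value of a dword read from the memory is the field's `i32`. -/
theorem dword_toInt (mem : Mem) (a : Nat) : (BitVec.ofNat 32 (mem.u32 a)).toInt = mem.i32 a := by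
  have hlt := Mem.u32_lt mem a
  have hc := sint32_cases (mem.u32 a)
  have e : (BitVec.ofNat 32 (mem.u32 a)).toNat = mem.u32 a := by
    rw [BitVec.toNat_ofNat]
    omega
  rw [Mem.i32_def, BitVec.toInt_eq_toNat_cond, e]
  split <;> omega

/-- **MP6 for submap `j`** from the two tests of the loop body (`cmp r12d, [f + 0B0H] ; jl`, `cmp r12d, [f + 140H] ; jl`). -/
theorem submap_ok {mem : Mem} {f m j b x : Nat} (h1 : mem.u8 (m + 17 + j) = b) (h2 : mem.u8 (m + 33 + j) = x)
    (hbr1 : (BitVec.zeroExtend 32 (BitVec.ofNat 8 b)).toInt < (BitVec.ofNat 32 (mem.u32 (f + 176))).toInt)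
    (hbr2 : (BitVec.zeroExtend 32 (BitVec.ofNat 8 x)).toInt < (BitVec.ofNat 32 (mem.u32 (f + 320))).toInt) :
    Mapping.SubmapOK mem f m j := by
  have hb : b < 256 := by
    rw [← h1]
    exact Mem.u8_lt mem _
  have hx : x < 256 := by
    rw [← h2]
    exact Mem.u8_lt mem _
  rw [zbyte_toInt b hb, dword_toInt] at hbr1
  rw [zbyte_toInt x hx, dword_toInt] at hbr2
  unfold Mapping.SubmapOK
  simp only [vacc, voff]
  rw [h1, h2]
  exact ⟨hbr1, hbr2⟩

/-- The own stores of 0x1164c7 – 0x116541 (the pushed return addresses, the spill `[R + 18H]`, the byte `submap_residue[j]`) are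
own spans. -/
theorem residue_spans {g : Ghost} {A : Arena × List Obj} {m j : Nat} (geo : Geo g A m) (hj : j < 16) :
    ∀ w, w ∈ [(⟨(g.e.reg .rsp).toNat - 1488, (g.e.reg .rsp).toNat - 1480⟩ : Span),
      ⟨(g.e.reg .rsp).toNat - 1456, (g.e.reg .rsp).toNat - 1452⟩, ⟨m + 33 + j, m + 34 + j⟩] → OwnSpan g m j w := by
  intro w hw
  have h1 := geo.r_eq
  have h2 := geo.room
  have hRA : g.RA = (g.e.reg .rsp).toNat := rfl
  simp only [List.mem_cons, List.mem_nil_iff, or_false] at hw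
  unfold OwnSpan
  rcases hw with rfl | rfl | rfl <;> simp only [] <;> omega

/-- The footprint of `error` called from the steady stack pointer is made of own spans. -/
theorem error_spans {g : Ghost} {A : Arena × List Obj} {m j : Nat} (geo : Geo g A m) :
    ∀ w, w ∈ [(⟨(g.e.reg .rsp).toNat - 1488 - 48, (g.e.reg .rsp).toNat - 1488⟩ : Span), ⟨g.f + 140, g.f + 140 + 4⟩] →
      OwnSpan g m j w := by
  intro w hw
  have h1 := geo.r_eq
  have h2 := geo.room
  have hRA : g.RA = (g.e.reg .rsp).toNat := rfl
  simp only [List.mem_cons, List.mem_nil_iff, or_false] at hw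
  unfold OwnSpan
  rcases hw with rfl | rfl <;> simp only [] <;> omega

/-- **0x1164c7 (cut307) → 0x116545 (cut310, the loop head, with `j + 1`) | 0x113b22 (`AtERR`, after `error(f, 20)`; two exits)**
(stb_vorbis_fixed.c:4135 – 4137, 4132 `++j`). -/
theorem seg_residue {Lay : Layout} (hLay : Lay.hi = 0x1000000) {μ : Microarch} (hμ : UserX.MicroOK μ) {u₀ : State}
    (hcode : HasCodeNat Lay u₀ Vorbis.L.start_decoder.entry Vorbis.Code.code_start_decoder.nat Vorbis.L.start_decoder.size)
    (hstore1 : Asan.SmallCheck Lay μ Vorbis.WayInv (Vorbis.CodeOK u₀) [.rax, .rdx] 1 Vorbis.L.__asan_store1_noabort.entry)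
    (hload1 : Asan.SmallCheck Lay μ Vorbis.WayInv (Vorbis.CodeOK u₀) [.rax, .rdx] 1 Vorbis.L.__asan_load1_noabort.entry)
    (hload4 : Asan.SmallCheck Lay μ Vorbis.WayInv (Vorbis.CodeOK u₀) [.rax, .rcx, .rdx] 4 Vorbis.L.__asan_load4_noabort.entry)
    (h_error : ∀ (others : List Obj) (frames : List (Nat × FrameLayout)),
      Calls Lay μ Vorbis.WayInv (Vorbis.conv u₀) Vorbis.L.error.entry (Vorbis.Spec.error.spec others frames))
    {g : Ghost} {i : Nat} {A7 A7c Ai : Arena} {A : Arena × List Obj} {m j : Nat} {v : State}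
    (hpc : PtC u₀ g i A7 A7c Ai A m j Vorbis.L.start_decoder.cut307 v) :
    ReachVia Lay μ WayInv v (fun w => AtERR u₀ g w ∨ Pt u₀ g i A7 A7c Ai A m (j + 1) Vorbis.L.start_decoder.cut310 w) := by
  have b_r13 : v.reg .r13 = UInt64.ofNat j := hpc.pt.r13
  have b_r12 : v.reg .r12 = UInt64.ofNat j := hpc.r12
  obtain ⟨hp, hjlt, -, b_r15⟩ := hpc
  obtain ⟨he, geo, hh, hofft, hext, hcallers, w_rip, b_rsp, b_rbp, b_rbx, -, hj16, hcore, hcnt, habi⟩ := hp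
  have he0 := he
  v_entry he
  have he_room' : 7340032 + 1888 ≤ (g.e.reg .rsp).toNat := he_room
  have he_stack' : Lay.Has (g.e.reg .rsp - 1888) (1888 + 8) := he_stack
  clear he_room he_stack
  have herr := h_error A.2 g.frames'
  have hR : g.R = (g.e.reg .rsp).toNat - 1480 := rfl
  have hRA : g.RA = (g.e.reg .rsp).toNat := rfl
  have w_eq : Mem.EqOn Vorbis.L.textLo Vorbis.L.textHi u₀.mem v.mem := hcore.code
  have hdf : v.flags .df = false := (show abiInv _ from habi).1
  have hmx : v.mxcsr &&& 0x1F80 = 0x1F80 := (show abiInv _ from habi).2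
  have hsse := Vorbis.sseOK_of_abiInv habi
  obtain ⟨z, b_rax⟩ : ∃ z, v.reg .rax = z := ⟨_, rfl⟩
  have hm_lo : 0x119d40 ≤ m := by
    have h1 := geo.arena_lo
    have h2 := geo.m_lo
    omega
  have hm_hi : m + 56 ≤ 0xC00000 := by
    have h1 := geo.arena_hi
    have h2 := geo.m_hi
    omega
  have hm_off := geo.m_off
  have hf_lo := geo.f_lo
  have hf_hi := geo.f_hi
  have hf_off : (g.e.reg .rsp).toNat + 8 ≤ g.f ∨ g.f + 1808 ≤ (g.e.reg .rsp).toNat - 1888 := by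
    have h1 := geo.f_off
    have h2 := geo.top
    omega
  have hf_m : g.f + 1808 ≤ m ∨ m + 56 ≤ g.f := by
    have h1 := geo.f_out
    have h2 := geo.m_lo
    have h3 := geo.m_hi
    omega
  have hmn : (addr m).toNat = m := toNat_addr m (by omega)
  have hfn : (addr g.f).toNat = g.f := toNat_addr g.f (by omega)
  have hjn : (UInt64.ofNat j).toNat = j := toNat_addr j (by omega)
  have hj31 : j < 2 ^ 31 := by omega
  obtain ⟨b, hb⟩ : ∃ b, v.mem.readLE (addr m + UInt64.ofNat j + 17) 1 = b := ⟨_, rfl⟩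
  obtain ⟨fc, hfc⟩ : ∃ fc, v.mem.readLE (addr g.f + 176) 4 = fc := ⟨_, rfl⟩
  obtain ⟨rc, hrc⟩ : ∃ rc, v.mem.readLE (addr g.f + 320) 4 = rc := ⟨_, rfl⟩
  u_walk hcode [hμ.vendor, cnt32_sext j hj31, cnt32_sext_bv j hj31, cnt32_part j] until [Vorbis.L.start_decoder.cut310, Vorbis.L.start_decoder.cut270, Vorbis.L.start_decoder.cut4] span [Vorbis.L.textLo, Vorbis.L.textHi] side (v_side)
  case check_1164d0 =>
    -- 0x1164d0: the store of `m->submap_residue[j]` (m + 33 + j) lies inside the record, a part of the mapping table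
    have hun : ShadowUntouched v.mem s_1164d0.mem := by v_untouched
    exact Vorbis.Spec.check_site hcore.shadow hun (hcore.site (33 + j) 1 (by omega) (by omega)) (by u_omega)
  case check_1164e2 =>
    -- 0x1164e2: the load of `m->submap_floor[j]` (m + 17 + j)
    have hun : ShadowUntouched v.mem s_1164e2.mem := by v_untouched
    refine Vorbis.Spec.check_site hcore.shadow hun (hcore.site (17 + j) 1 (by omega) (by omega)) ?_
    rw [toNat_addr _ (by omega)]
    omega
  case check_1164f4 =>
    -- 0x1164f4: the load of `f->floor_count` (f + 176)
    have hun : ShadowUntouched v.mem s_1164f4.mem := by v_untouched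
    refine (hh.obj.mono (ownFrames_sub g A.2)).accSmall hcore.shadow hun _ 4 (by decide) (by u_omega) ?_
    simp only [Off.sizeof.stb_vorbis]
    u_omega
  case check_116521 =>
    -- 0x116521: the load of `f->residue_count` (f + 320)
    have hun : ShadowUntouched v.mem s_116521.mem := by v_untouched
    refine (hh.obj.mono (ownFrames_sub g A.2)).accSmall hcore.shadow hun _ 4 (by decide) (by u_omega) ?_
    simp only [Off.sizeof.stb_vorbis]
    u_omega
  case call_inv => v_inv
  case pre_116537 =>
    -- 0x116537: `error(f, VORBIS_invalid_setup)` (stb_vorbis_fixed.c:4137)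
    have hs : Mem.SameExcept [⟨(g.e.reg .rsp).toNat - 1488, (g.e.reg .rsp).toNat - 1480⟩,
        ⟨(g.e.reg .rsp).toNat - 1456, (g.e.reg .rsp).toNat - 1452⟩, ⟨m + 33 + j, m + 34 + j⟩] v.mem s_116537.mem := by
      u_same
    have hcore1 := hcore.transfer_own geo hext hj16 hs (residue_spans geo hjlt)
    have ersp : (s_116537.reg .rsp).toNat + 8 = g.R := by
      rw [w_rsp]
      u_omega
    refine ⟨⟨?_, hofft⟩, ?_⟩
    · rw [ersp]
      exact hcore1.shadow
    · rw [w_rdi, hfn]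
      exact hh.obj.mono (ownFrames_sub g A.2)
  case call_inv => v_inv
  case pre_11650a =>
    -- 0x11650a: `error(f, VORBIS_invalid_setup)` (stb_vorbis_fixed.c:4136)
    have hs : Mem.SameExcept [⟨(g.e.reg .rsp).toNat - 1488, (g.e.reg .rsp).toNat - 1480⟩,
        ⟨(g.e.reg .rsp).toNat - 1456, (g.e.reg .rsp).toNat - 1452⟩, ⟨m + 33 + j, m + 34 + j⟩] v.mem s_11650a.mem := by
      u_same
    have hcore1 := hcore.transfer_own geo hext hj16 hs (residue_spans geo hjlt)
    have ersp : (s_11650a.reg .rsp).toNat + 8 = g.R := by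
      rw [w_rsp]
      u_omega
    refine ⟨⟨?_, hofft⟩, ?_⟩
    · rw [ersp]
      exact hcore1.shadow
    · rw [w_rdi, hfn]
      exact hh.obj.mono (ownFrames_sub g A.2)
  case cont =>
    -- 0x116541 `add r13d, 1` → 0x116545 (cut310): both tests passed, MP6 for submap `j`; the loop invariant for `j + 1`
    obtain ⟨x, hx⟩ : ∃ x, (v.mem.writeLE (g.e.reg .rsp - 1456) 4 (Word.part .w32 z).toNat).readLE
        (g.e.reg .rsp - 1456) 1 = x := ⟨_, rfl⟩
    have hx256 : x < 256 := by
      have := Mem.readLE_lt' (v.mem.writeLE (g.e.reg .rsp - 1456) 4 (Word.part .w32 z).toNat) (g.e.reg .rsp - 1456) 1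
      rw [hx] at this
      omega
    rw [hx] at hbr_11652d w_mem
    rw [byte_val x hx256] at w_mem
    have hs : Mem.SameExcept [⟨(g.e.reg .rsp).toNat - 1488, (g.e.reg .rsp).toNat - 1480⟩,
        ⟨(g.e.reg .rsp).toNat - 1456, (g.e.reg .rsp).toNat - 1452⟩, ⟨m + 33 + j, m + 34 + j⟩] v.mem s_116541.mem := by
      u_same
    have hcore1 := hcore.transfer_own geo hext hj16 hs (residue_spans geo hjlt)
    have ea17 : addr m + UInt64.ofNat j + 17 = addr (m + 17 + j) := by
      apply eq_addr
      u_omega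
    have ea33 : addr m + UInt64.ofNat j + 33 = addr (m + 33 + j) := by
      apply eq_addr
      u_omega
    have g1 : s_116541.mem.u8 (m + 17 + j) = b := by
      unfold Mem.u8
      rw [← ea17, w_mem]
      u_frame hb
    have g2 : s_116541.mem.u8 (m + 33 + j) = x := by
      unfold Mem.u8
      rw [← ea33, w_mem]
      u_read
    have g3 : s_116541.mem.u32 (g.f + 176) = fc := by
      unfold Mem.u32
      rw [← addr_add_lit, w_mem]
      u_frame hfc
    have g4 : s_116541.mem.u32 (g.f + 320) = rc := by
      unfold Mem.u32
      rw [← addr_add_lit, w_mem]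
      u_frame hrc
    rw [← g3] at hbr_116500
    rw [← g4] at hbr_11652d
    have hsub := submap_ok g1 g2 hbr_116500 hbr_11652d
    have hcnt' : s_116541.mem.readLE (g.e.reg .rsp - 1464) 4 = i := by
      rw [w_mem]
      u_frame hcnt
    have hinv : abiInv s_116541 := by v_inv
    refine ReachVia.done (Or.inr ⟨he0, geo, hh, hofft, hext, hcallers, w_rip, w_rsp, ?_, ?_, ?_, by omega,
      hcore1.succ hsub, hcnt', hinv⟩)
    · rw [w_kept .rbp rfl]
      exact b_rbp
    · rw [w_kept .rbx rfl]
      exact b_rbx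
    · rw [w_r13, cnt32_succ_bv, cnt32_ofBV (j + 1) (by omega)]
      rfl
  case cont =>
    -- 0x11653c (cut309), the state `error` returned (stb_vorbis_fixed.c:4137), then `jmp 113b22`: SD.ERR
    have hs : Mem.SameExcept [⟨(g.e.reg .rsp).toNat - 1488, (g.e.reg .rsp).toNat - 1480⟩,
        ⟨(g.e.reg .rsp).toNat - 1456, (g.e.reg .rsp).toNat - 1452⟩, ⟨m + 33 + j, m + 34 + j⟩] v.mem s_116537.mem := by
      rw [w_mem_116537]
      u_same
    have hcore1 := hcore.transfer_own geo hext hj16 hs (residue_spans geo hjlt)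
    have ersp : (g.e.reg .rsp - 1488).toNat = (g.e.reg .rsp).toNat - 1488 := by u_omega
    simp only [X86.User.Spec.footprint, vspec, w_rsp_116537, w_rdi_116537, ersp, hfn] at w_same
    have hcore2 := hcore1.transfer_own geo hext hj16 w_same (error_spans geo)
    have hrax := w_post.1
    have hinvr : abiInv s_116537r := w_inv
    have w_eq := Vorbis.conv_code_eqOn w_code
    clear w_same w_post
    u_walk hcode [hμ.vendor] until [Vorbis.L.start_decoder.cut4] span [Vorbis.L.textLo, Vorbis.L.textHi] side (v_side)
    rw [← w_mem] at hcore2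
    have hinv : abiInv s_11653c := by
      refine ⟨?_, ?_⟩
      · rw [w_flags]
        exact hinvr.1
      · rw [w_mxcsr]
        exact hinvr.2
    have hrsp : s_11653c.reg .rsp = addr g.R := by
      rw [w_rsp, hR, ← addr_sub_lit (g.e.reg .rsp).toNat 1480 (by omega), addr_toNat]
    refine ReachVia.done (Or.inl ⟨A, hcore2.frame he0 w_rip hrsp hinv hofft hext hcallers, hh, Or.inl ⟨?_, hcore2.failed⟩⟩)
    rw [w_rax]
    rfl
  case cont =>
    -- 0x11650f (cut308), the state `error` returned (stb_vorbis_fixed.c:4136), then `jmp 113b22`: SD.ERR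
    have hs : Mem.SameExcept [⟨(g.e.reg .rsp).toNat - 1488, (g.e.reg .rsp).toNat - 1480⟩,
        ⟨(g.e.reg .rsp).toNat - 1456, (g.e.reg .rsp).toNat - 1452⟩, ⟨m + 33 + j, m + 34 + j⟩] v.mem s_11650a.mem := by
      rw [w_mem_11650a]
      u_same
    have hcore1 := hcore.transfer_own geo hext hj16 hs (residue_spans geo hjlt)
    have ersp : (g.e.reg .rsp - 1488).toNat = (g.e.reg .rsp).toNat - 1488 := by u_omega
    simp only [X86.User.Spec.footprint, vspec, w_rsp_11650a, w_rdi_11650a, ersp, hfn] at w_same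
    have hcore2 := hcore1.transfer_own geo hext hj16 w_same (error_spans geo)
    have hrax := w_post.1
    have hinvr : abiInv s_11650ar := w_inv
    have w_eq := Vorbis.conv_code_eqOn w_code
    clear w_same w_post
    u_walk hcode [hμ.vendor] until [Vorbis.L.start_decoder.cut4] span [Vorbis.L.textLo, Vorbis.L.textHi] side (v_side)
    rw [← w_mem] at hcore2
    have hinv : abiInv s_11650f := by
      refine ⟨?_, ?_⟩
      · rw [w_flags]
        exact hinvr.1
      · rw [w_mxcsr]
        exact hinvr.2
    have hrsp : s_11650f.reg .rsp = addr g.R := by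
      rw [w_rsp, hR, ← addr_sub_lit (g.e.reg .rsp).toNat 1480 (by omega), addr_toNat]
    refine ReachVia.done (Or.inl ⟨A, hcore2.frame he0 w_rip hrsp hinv hofft hext hcallers, hh, Or.inl ⟨?_, hcore2.failed⟩⟩)
    rw [w_rax]
    rfl

end Vorbis.Spec.start_decoder_R12
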